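-- pv_equiv track=rewrite | github.com/Atharv-Pawar/Python_Tutorials | tutorials_of_python/pratciceset01.py | top_users_by_transaction
-- ===== SOURCE A (Python) =====
-- def top_users_by_transaction(transactions):
--     user_totals = {}
--     for transaction in transactions:
--         user_id = transaction['user_id']
--         amount = transaction['amount']
--         if user_id in user_totals:
--             user_totals[user_id] += amount
--         else:
--             user_totals[user_id] = amount
--     sorted_users = sorted(user_totals.items(), key=lambda x: x[1], reverse=True)
--     return sorted_users[:3]
-- ===== SOURCE B (Python) =====
-- def top_users_by_transaction(transactions):
--     totals = {}
--     for t in transactions: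
--         u = t['user_id']
--         totals[u] = totals.get(u, 0) + t['amount']
--     items = list(totals.items())
--     top = []
--     while items and len(top) < 3:
--         best = max(items, key=lambda p: p[1])
--         top.append(best)
--         items.remove(best)
--     return top
-- ===== Notes on version B (the rewrite author's own statement) =====
-- stated objective: alternative
-- what changed: B replaces A's full descending sort of the per-user totals followed by a [:3] slice with three rounds of bounded selection: repeatedly take the first maximal item (max with key) and remove it, which yields exactly the stable-sort prefix.
import Mathlib
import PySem

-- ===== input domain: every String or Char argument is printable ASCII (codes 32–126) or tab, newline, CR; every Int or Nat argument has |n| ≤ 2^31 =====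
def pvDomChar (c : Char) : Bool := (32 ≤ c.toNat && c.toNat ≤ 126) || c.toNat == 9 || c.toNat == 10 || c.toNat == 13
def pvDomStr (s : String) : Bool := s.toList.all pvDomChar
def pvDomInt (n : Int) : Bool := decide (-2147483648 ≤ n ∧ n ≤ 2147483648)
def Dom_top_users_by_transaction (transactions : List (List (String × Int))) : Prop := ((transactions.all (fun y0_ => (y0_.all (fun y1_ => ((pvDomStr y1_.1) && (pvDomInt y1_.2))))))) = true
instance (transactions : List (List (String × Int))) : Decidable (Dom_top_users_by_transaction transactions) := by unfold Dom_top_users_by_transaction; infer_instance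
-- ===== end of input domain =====

-- B replaces A's full descending sort + [:3] slice with three rounds of first-maximum selection
-- (max + remove); equivalence of the RETURN value is proved (neither version mutates its argument).

-- ===== PORT A =====
-- each transaction dict is its association list; t['user_id'] raises KeyError when absent —
-- Pre_ excludes that, so the `.getD 0` default is never reached on admitted inputs
def top_users_by_transaction (transactions : List (List (String × Int))) : List (Int × Int) :=
  let user_totals : PySem.Dict Int Int :=
    transactions.foldl (fun d t =>
      let user_id := ((PySem.Dict.mk t).get? "user_id").getD 0
      let amount := ((PySem.Dict.mk t).get? "amount").getD 0
      if d.contains user_id then d.insert user_id (d.getD user_id 0 + amount)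
      else d.insert user_id amount) PySem.Dict.empty
  let sorted_users := PySem.List.sorted user_totals.items (fun x => x.2) true
  PySem.List.slice sorted_users none (some 3)

-- ===== PORT B =====
-- the `while items and len(top) < 3` loop of Source B, with fuel 3 - len(top)
def pvPickTop : Nat → List (Int × Int) → List (Int × Int)
  | 0, _ => []
  | n + 1, items =>
    match PySem.List.max? items (fun p => p.2) with
    | none => []  -- items == [], loop stops
    | some best => best :: pvPickTop n ((PySem.List.remove? items best).getD items)
  termination_by n => n

def top_users_by_transaction_alt (transactions : List (List (String × Int))) : List (Int × Int) :=
  let totals : PySem.Dict Int Int :=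
    transactions.foldl (fun d t =>
      let u := ((PySem.Dict.mk t).get? "user_id").getD 0
      let a := ((PySem.Dict.mk t).get? "amount").getD 0
      d.insert u (d.getD u 0 + a)) PySem.Dict.empty
  pvPickTop 3 totals.items

-- ===== PRECONDITION & SPEC =====
-- Pre_ excludes exactly the inputs where A raises KeyError: a transaction without a
-- 'user_id' or 'amount' key.
def Pre_top_users_by_transaction (transactions : List (List (String × Int))) : Prop :=
  ∀ t ∈ transactions, (PySem.Dict.mk t).contains "user_id" = true ∧ (PySem.Dict.mk t).contains "amount" = true
instance (transactions : List (List (String × Int))) : Decidable (Pre_top_users_by_transaction transactions) := by unfold Pre_top_users_by_transaction; infer_instance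

def pvWitness_top_users_by_transaction : (List (List (String × Int))) :=
  [[("user_id", 1), ("amount", 5)], [("user_id", 2), ("amount", 3)], [("user_id", 1), ("amount", 2)]]

def Spec_top_users_by_transaction (transactions : List (List (String × Int))) (out : List (Int × Int)) : Prop := out = top_users_by_transaction_alt transactions
instance (transactions : List (List (String × Int))) (out : List (Int × Int)) : Decidable (Spec_top_users_by_transaction transactions out) := by unfold Spec_top_users_by_transaction; infer_instance

-- ===== CLAIM (what is proved, stated in full; the proofs are below) =====
def Claim_equal_top_users_by_transaction : Prop := ∀ (transactions : List (List (String × Int))), Dom_top_users_by_transaction transactions → Pre_top_users_by_transaction transactions → Spec_top_users_by_transaction transactions (top_users_by_transaction transactions)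

-- ===== LEMMAS AND PROOFS =====

-- the two aggregation loops build the same dict
theorem pv_agg_eq (transactions : List (List (String × Int))) :
    transactions.foldl (fun d t =>
      let user_id := ((PySem.Dict.mk t).get? "user_id").getD 0
      let amount := ((PySem.Dict.mk t).get? "amount").getD 0
      if d.contains user_id then d.insert user_id (d.getD user_id 0 + amount)
      else d.insert user_id amount) PySem.Dict.empty
    = transactions.foldl (fun d t =>
      let u := ((PySem.Dict.mk t).get? "user_id").getD 0
      let a := ((PySem.Dict.mk t).get? "amount").getD 0
      d.insert u (d.getD u 0 + a)) PySem.Dict.empty := by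
  apply List.foldl_ext
  intro d t _
  simp only
  by_cases h : d.contains (((PySem.Dict.mk t).get? "user_id").getD 0) = true
  · rw [if_pos h]
  · rw [if_neg h, PySem.Dict.getD_of_not_contains _ _ (by simpa using h), Int.zero_add]

-- insertBy (descending, stable) and the key-class filter
theorem pv_filter_insertBy (x : Int × Int) (ys : List (Int × Int)) (k : Int)
    (hs : ys.Pairwise (fun a b => b.2 ≤ a.2)) :
    (PySem.List.insertBy (fun a b => decide (b.2 < a.2)) x ys).filter (fun y => y.2 == k)
      = if x.2 = k then ys.filter (fun y => y.2 == k) ++ [x] else ys.filter (fun y => y.2 == k) := by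
  induction ys with
  | nil => by_cases h : x.2 = k <;> simp [PySem.List.insertBy, h]
  | cons y ys ih =>
    rw [List.pairwise_cons] at hs
    by_cases hlt : y.2 < x.2
    · have hstep : PySem.List.insertBy (fun a b => decide (b.2 < a.2)) x (y :: ys)
          = x :: y :: ys := by
        simp [PySem.List.insertBy, hlt]
      rw [hstep]
      by_cases hk : x.2 = k
      · have hF : List.filter (fun z => z.2 == k) (y :: ys) = [] := by
          rw [List.filter_eq_nil_iff]
          intro z hz
          have hz2 : z.2 ≤ y.2 := by
            rcases List.mem_cons.mp hz with rfl | h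
            · exact le_refl _
            · exact hs.1 z h
          simp only [beq_iff_eq]
          omega
        rw [List.filter_cons, hF]
        simp [hk]
      · rw [List.filter_cons]
        simp [hk]
    · have hstep : PySem.List.insertBy (fun a b => decide (b.2 < a.2)) x (y :: ys)
          = y :: PySem.List.insertBy (fun a b => decide (b.2 < a.2)) x ys := by
        simp [PySem.List.insertBy, hlt]
      rw [hstep, List.filter_cons, ih hs.2]
      by_cases hk : x.2 = k <;> by_cases hyk : y.2 = k <;> simp [hk, hyk]

-- the stable descending sort preserves each key class in order
theorem pv_filter_sorted (xs : List (Int × Int)) (k : Int) :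
    (PySem.List.sorted xs (fun p => p.2) true).filter (fun y => y.2 == k)
      = xs.filter (fun y => y.2 == k) := by
  induction xs using List.reverseRecOn with
  | nil => rfl
  | append_singleton xs x ih =>
    have hstep : PySem.List.sorted (xs ++ [x]) (fun p => p.2) true
        = PySem.List.insertBy (fun a b => decide (b.2 < a.2)) x (PySem.List.sorted xs (fun p => p.2) true) := by
      rw [PySem.List.sorted_rev_eq_foldl_insertBy, PySem.List.sorted_rev_eq_foldl_insertBy,
        List.foldl_append]
      rfl
    rw [hstep, pv_filter_insertBy x _ k (PySem.List.sorted_pairwise_rev xs (fun p => p.2)), ih,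
      List.filter_append]
    by_cases hk : x.2 = k <;> simp [hk]

-- max? returns the FIRST maximal element: everything before it is strictly smaller
theorem pv_max?_cons (a y : Int × Int) (t : List (Int × Int)) :
    PySem.List.max? (a :: y :: t) (fun p => p.2)
      = PySem.List.max? ((if a.2 < y.2 then y else a) :: t) (fun p => p.2) := by
  simp only [PySem.List.max?, List.foldl_cons]
  by_cases h : a.2 < y.2 <;> simp [h]

theorem pv_max?_first_cons (t : List (Int × Int)) (a m : Int × Int)
    (h : PySem.List.max? (a :: t) (fun p => p.2) = some m) :
    (m = a ∧ ∀ y ∈ t, y.2 ≤ a.2) ∨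
      (∃ pre suf, t = pre ++ m :: suf ∧ a.2 < m.2 ∧ (∀ y ∈ pre, y.2 < m.2) ∧ ∀ y ∈ suf, y.2 ≤ m.2) := by
  induction t generalizing a with
  | nil =>
    have : m = a := by
      have h' : some a = some m := by simpa [PySem.List.max?] using h
      injection h' with h'
      exact h'.symm
    exact Or.inl ⟨this, by simp⟩
  | cons y t ih =>
    rw [pv_max?_cons] at h
    by_cases hy : a.2 < y.2
    · rw [if_pos hy] at h
      rcases ih y h with ⟨rfl, hall⟩ | ⟨pre, suf, rfl, hlt, hpre, hsuf⟩
      · exact Or.inr ⟨[], t, rfl, hy, by simp, hall⟩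
      · refine Or.inr ⟨y :: pre, suf, rfl, lt_trans hy hlt, ?_, hsuf⟩
        intro z hz
        rcases List.mem_cons.mp hz with rfl | hz
        · exact hlt
        · exact hpre z hz
    · rw [if_neg hy] at h
      rcases ih a h with ⟨rfl, hall⟩ | ⟨pre, suf, rfl, hlt, hpre, hsuf⟩
      · refine Or.inl ⟨rfl, ?_⟩
        intro z hz
        rcases List.mem_cons.mp hz with rfl | hz
        · omega
        · exact hall z hz
      · refine Or.inr ⟨y :: pre, suf, rfl, hlt, ?_, hsuf⟩
        intro z hz
        rcases List.mem_cons.mp hz with rfl | hz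
        · omega
        · exact hpre z hz

theorem pv_max?_first (l : List (Int × Int)) (m : Int × Int)
    (h : PySem.List.max? l (fun p => p.2) = some m) :
    ∃ pre suf, l = pre ++ m :: suf ∧ (∀ y ∈ pre, y.2 < m.2) ∧ ∀ y ∈ suf, y.2 ≤ m.2 := by
  cases l with
  | nil => simp [PySem.List.max?] at h
  | cons x t =>
    rcases pv_max?_first_cons t x m h with ⟨rfl, hall⟩ | ⟨pre, suf, rfl, hlt, hpre, hsuf⟩
    · exact ⟨[], t, rfl, by simp, hall⟩
    · refine ⟨x :: pre, suf, rfl, ?_, hsuf⟩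
      intro z hz
      rcases List.mem_cons.mp hz with rfl | hz
      · exact hlt
      · exact hpre z hz

-- two descending lists with identical key classes are equal
theorem pv_unique (l₁ l₂ : List (Int × Int))
    (h₁ : l₁.Pairwise (fun a b => b.2 ≤ a.2)) (h₂ : l₂.Pairwise (fun a b => b.2 ≤ a.2))
    (hf : ∀ k, l₁.filter (fun y => y.2 == k) = l₂.filter (fun y => y.2 == k)) : l₁ = l₂ := by
  induction l₁ generalizing l₂ with
  | nil =>
    cases l₂ with
    | nil => rfl
    | cons b t₂ =>
      have := hf b.2
      simp at this
  | cons a t₁ ih =>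
    cases l₂ with
    | nil =>
      have := hf a.2
      simp at this
    | cons b t₂ =>
      rw [List.pairwise_cons] at h₁ h₂
      have ha : a ∈ b :: t₂ := by
        have := hf a.2
        have hmem : a ∈ (b :: t₂).filter (fun y => y.2 == a.2) := by
          rw [← this]; simp
        exact List.mem_of_mem_filter hmem
      have hb : b ∈ a :: t₁ := by
        have := hf b.2
        have hmem : b ∈ (a :: t₁).filter (fun y => y.2 == b.2) := by
          rw [this]; simp
        exact List.mem_of_mem_filter hmem
      have hab : a.2 = b.2 := by
        have h1 : a.2 ≤ b.2 := by
          rcases List.mem_cons.mp ha with rfl | hz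
          · rfl
          · exact h₂.1 a hz
        have h2 : b.2 ≤ a.2 := by
          rcases List.mem_cons.mp hb with rfl | hz
          · rfl
          · exact h₁.1 b hz
        omega
      have hk := hf b.2
      simp only [List.filter_cons, hab, beq_self_eq_true, if_true] at hk
      obtain ⟨rfl, htail⟩ := List.cons_eq_cons.mp hk
      congr 1
      refine ih t₂ h₁.2 h₂.2 (fun k => ?_)
      by_cases hka : k = a.2
      · subst hka
        exact htail
      · have hne : (a.2 == k) = false := beq_eq_false_iff_ne.mpr (fun h => hka h.symm)
        have h0 := hf k
        simp only [List.filter_cons, hne, Bool.false_eq_true, if_false] at h0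
        exact h0

-- selecting the first maximum peels the head off the stable descending sort
theorem pv_sorted_cons (l : List (Int × Int)) (m : Int × Int)
    (h : PySem.List.max? l (fun p => p.2) = some m) :
    PySem.List.sorted l (fun p => p.2) true = m :: PySem.List.sorted (l.erase m) (fun p => p.2) true := by
  obtain ⟨pre, suf, rfl, hpre, hsuf⟩ := pv_max?_first l m h
  have hnm : m ∉ pre := fun hm => absurd (hpre m hm) (lt_irrefl _)
  have herase : (pre ++ m :: suf).erase m = pre ++ suf := by
    rw [List.erase_append_right _ hnm, List.erase_cons_head]
  apply pv_unique
  · exact PySem.List.sorted_pairwise_rev _ _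
  · rw [List.pairwise_cons]
    constructor
    · intro y hy
      have hy' : y ∈ (pre ++ m :: suf).erase m := by
        exact (PySem.List.mem_sorted _ _ _ _).mp hy
      have hy'' : y ∈ pre ++ m :: suf := List.mem_of_mem_erase hy'
      rcases List.mem_append.mp hy'' with hy3 | hy3
      · exact le_of_lt (hpre y hy3)
      · rcases List.mem_cons.mp hy3 with rfl | hy4
        · rfl
        · exact hsuf y hy4
    · exact PySem.List.sorted_pairwise_rev _ _
  · intro k
    rw [pv_filter_sorted, List.filter_cons, herase, pv_filter_sorted, List.filter_append,
      List.filter_append, List.filter_cons]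
    by_cases hk : m.2 = k
    · have hm : (m.2 == k) = true := by simpa using hk
      have hpre0 : pre.filter (fun y => y.2 == k) = [] := by
        rw [List.filter_eq_nil_iff]
        intro z hz
        have := hpre z hz
        simp only [beq_iff_eq]
        omega
      simp [hm, hpre0]
    · have hm : (m.2 == k) = false := by simpa using hk
      simp [hm]

-- the selection loop computes take n of the sorted list
theorem pv_pickTop_eq (n : Nat) (l : List (Int × Int)) :
    pvPickTop n l = (PySem.List.sorted l (fun p => p.2) true).take n := by
  induction n generalizing l with
  | zero => simp [pvPickTop]
  | succ n ih =>
    cases hm : PySem.List.max? l (fun p => p.2) with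
    | none =>
      have : l = [] := (PySem.List.max?_eq_none_iff _ _).mp hm
      subst this
      simp [pvPickTop, PySem.List.max?, PySem.List.sorted]
    | some m =>
      have hmem : m ∈ l := PySem.List.max?_mem hm
      rw [pv_sorted_cons l m hm]
      simp only [pvPickTop, hm, List.take_succ_cons]
      rw [PySem.List.remove?_eq_some_erase l m hmem]
      simp only [Option.getD_some]
      exact congrArg (m :: ·) (ih _)

-- ===== VERDICT (by name: the statement is the Claim_ definition above) =====
theorem top_users_by_transaction_spec : Claim_equal_top_users_by_transaction := by
  intro transactions _ _
  unfold Spec_top_users_by_transaction top_users_by_transaction top_users_by_transaction_alt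
  simp only
  rw [pv_agg_eq, pv_pickTop_eq]
  rw [PySem.List.slice_to _ (by norm_num)]
  rfl
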